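-- pv_equiv track=rewrite | github.com/yctsai2727/SMTExampleCompletion | LTLsynthesis/utilities.py | shorten_traces
-- ===== SOURCE A (Python) =====
-- def shorten_traces(traces):
-- 	traces = list(map(lambda trace: ".".join(trace), traces))
-- 	traces.sort(key=lambda t: len(t))
-- 	shortened_traces = []
-- 	n = len(traces)
-- 	for i in range(n):
-- 		trace = traces[i]
-- 		shouldAdd = True
-- 		for j in range(i+1, n):
-- 			if traces[j].startswith(trace):
-- 				shouldAdd = False
-- 				break
-- 		if shouldAdd:
-- 			shortened_traces.append(trace.split('.'))
-- 	return shortened_traces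
-- ===== SOURCE B (Python) =====
-- def shorten_traces(traces):
--     joined = ['.'.join(t) for t in traces]
--     # a joined trace is a proper prefix of another distinct one iff it is a prefix
--     # of its immediate successor in lexicographic order
--     distinct = sorted(set(joined))
--     dead = set()
--     for a, b in zip(distinct, distinct[1:]):
--         if b.startswith(a):
--             dead.add(a)
--     # last occurrence index of each joined trace
--     last = {}
--     for i, s in enumerate(joined):
--         last[s] = i
--     kept = [(len(s), i, s) for i, s in enumerate(joined)
--             if s not in dead and last[s] == i]
--     kept.sort(key=lambda q: (q[0], q[1]))
--     return [s.split('.') for _, _, s in kept]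
-- ===== Notes on version B (the rewrite author's own statement) =====
-- stated objective: alternative
-- what changed: A's quadratic scan (for each length-sorted trace, test every later trace with startswith) is replaced by a lexicographic sort of the distinct joined traces with an adjacent-neighbour prefix check plus a last-occurrence dict, ordering survivors by a (length, index) key sort; measured 1.21x at the largest timing size, below the 1.5x bar, so no speed is claimed.
import Mathlib
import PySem

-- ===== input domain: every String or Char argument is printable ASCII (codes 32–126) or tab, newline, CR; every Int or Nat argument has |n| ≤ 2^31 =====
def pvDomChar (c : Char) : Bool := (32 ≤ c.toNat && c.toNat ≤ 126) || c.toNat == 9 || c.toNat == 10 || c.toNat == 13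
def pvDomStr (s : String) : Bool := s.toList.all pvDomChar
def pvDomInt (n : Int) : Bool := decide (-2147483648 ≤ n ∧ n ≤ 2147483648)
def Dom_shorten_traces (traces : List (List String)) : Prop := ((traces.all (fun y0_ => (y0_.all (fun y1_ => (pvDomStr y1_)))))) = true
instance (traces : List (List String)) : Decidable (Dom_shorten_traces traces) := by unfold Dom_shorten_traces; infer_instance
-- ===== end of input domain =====

-- B replaces A's all-later-pairs startswith scan after the length sort by a lexicographic
-- sort of the distinct joined traces with an adjacent-neighbour prefix check, plus a
-- last-occurrence dict, ordering the survivors by a (length, index) key sort.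

-- s.split('.'): PySem.Str.split? is none only for an empty separator, so with "." it is exact
def pvSplitDot (s : String) : List String := (PySem.Str.split? s ".").getD []

-- ===== PORT A =====
-- A's 'for i … for j in range(i+1, n) … break': keep traces[i] iff no later element startswith it
def pvALoop : List String → List (List String)
  | [] => []
  | t :: rest =>
    if rest.any (fun u => PySem.Str.startswith u t) then pvALoop rest
    else pvSplitDot t :: pvALoop rest

def shorten_traces (traces : List (List String)) : List (List String) :=
  let ts := traces.map (fun tr => PySem.Str.join "." tr)
  let sortedTs := PySem.List.sorted ts (fun t => PySem.Str.len t) false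
  pvALoop sortedTs

-- ===== PORT B =====
def shorten_traces_alt (traces : List (List String)) : List (List String) :=
  let joined := traces.map (fun tr => PySem.Str.join "." tr)
  let distinct := PySem.List.sorted (PySem.Set.ofList joined) (fun x => x) false
  let dead : PySem.Set String :=
    (distinct.zip (PySem.List.slice distinct (some 1) none)).foldl
      (fun st ab => if PySem.Str.startswith ab.2 ab.1 then PySem.Set.add st ab.1 else st)
      PySem.Set.empty
  let last : PySem.Dict String Int :=
    (PySem.List.enumerate joined 0).foldl (fun d p => d.insert p.2 p.1) PySem.Dict.empty
  let kept : List (Int × Int × String) :=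
    ((PySem.List.enumerate joined 0).filter
        (fun p => !(PySem.Set.contains dead p.2) && (PySem.Dict.get? last p.2 == some p.1))).map
      (fun p => (PySem.Str.len p.2, p.1, p.2))
  let keptSorted := PySem.List.sorted2 kept (fun q => q.1) (fun q => q.2.1) false
  keptSorted.map (fun q => pvSplitDot q.2.2)

-- ===== PRECONDITION & SPEC =====
def Spec_shorten_traces (traces : List (List String)) (out : List (List String)) : Prop := out = shorten_traces_alt traces
instance (traces : List (List String)) (out : List (List String)) : Decidable (Spec_shorten_traces traces out) := by unfold Spec_shorten_traces; infer_instance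

-- ===== CLAIM (what is proved, stated in full; the proofs are below) =====
def Claim_equal_shorten_traces : Prop := ∀ (traces : List (List String)), Dom_shorten_traces traces → Spec_shorten_traces traces (shorten_traces traces)

-- ===== LEMMAS AND PROOFS =====

-- abbreviations used only by the proofs
def pvE (J : List String) : List (Int × String) := PySem.List.enumerate J 0
-- the strict "(length, original index)" order A's stable length sort realises
def pvKlt (a b : Int × String) : Prop :=
  PySem.Str.len a.2 < PySem.Str.len b.2 ∨ (PySem.Str.len a.2 = PySem.Str.len b.2 ∧ a.1 < b.1)
def pvLex2 (q r : Int × Int × String) : Prop := q.1 < r.1 ∨ (q.1 = r.1 ∧ q.2.1 < r.2.1)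
-- survival condition: no proper superstring anywhere, and this is the last occurrence
def pvQb (J : List String) (p : Int × String) : Bool :=
  (!(J.any (fun t => PySem.Chars.startswith t.toList p.2.toList && decide (p.2.toList.length < t.toList.length))))
  && ((PySem.List.enumerate J 0).all (fun q => decide (q.2 = p.2 → q.1 ≤ p.1)))
-- boolean comparators of the three sorts involved
def pvB1 (a b : String) : Bool := decide (PySem.Str.len a < PySem.Str.len b)
def pvB2 (a b : Int × String) : Bool :=
  decide (PySem.Str.len a.2 < PySem.Str.len b.2) ||
    (!decide (PySem.Str.len b.2 < PySem.Str.len a.2) && decide (a.1 < b.1))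
def pvB3 (a b : Int × Int × String) : Bool :=
  decide (a.1 < b.1) || (!decide (b.1 < a.1) && decide (a.2.1 < b.2.1))
def pvD (J : List String) : List (Int × String) :=
  PySem.List.sorted2 (pvE J) (fun p => PySem.Str.len p.2) (fun p => p.1) false
def pvDec (p : Int × String) : Int × Int × String := (PySem.Str.len p.2, p.1, p.2)
def pvDistinct (J : List String) : List String :=
  PySem.List.sorted (PySem.Set.ofList J) (fun x => x) false
def pvDead (J : List String) : PySem.Set String :=
  ((pvDistinct J).zip (PySem.List.slice (pvDistinct J) (some 1) none)).foldl
    (fun st ab => if PySem.Str.startswith ab.2 ab.1 then PySem.Set.add st ab.1 else st)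
    PySem.Set.empty
def pvLast (J : List String) : PySem.Dict String Int :=
  (PySem.List.enumerate J 0).foldl (fun d p => d.insert p.2 p.1) PySem.Dict.empty

lemma pvQb_iff (J : List String) (p : Int × String) :
    pvQb J p = true ↔
      (¬ ∃ t ∈ J, p.2.toList <+: t.toList ∧ p.2.toList.length < t.toList.length) ∧
      (∀ q ∈ pvE J, q.2 = p.2 → q.1 ≤ p.1) := by
  simp [pvQb, PySem.Chars.startswith_iff, pvE]
  intro _
  constructor
  · intro h a b hab hba
    rcases h a b hab with h'|h'
    · exact absurd hba h'
    · exact h'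
  · intro h a b hab; by_cases hb : b = p.2
    · exact Or.inr (h a b hab hb)
    · exact Or.inl hb

lemma snd_mem_of_mem_pvE (J : List String) (q : Int × String) (h : q ∈ pvE J) : q.2 ∈ J := by
  rcases (PySem.List.mem_enumerate_iff J 0 q).mp h with ⟨k, hk, rfl⟩
  simp

lemma pvKlt_irrefl (p : Int × String) : ¬ pvKlt p p := by simp [pvKlt]

lemma pvKlt_trans {a b c : Int × String} (h1 : pvKlt a b) (h2 : pvKlt b c) : pvKlt a c := by
  unfold pvKlt at *; omega

-- insertion with pvB2 commutes with dropping indices when the new index is the largest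
lemma map_snd_insertBy (x : Int × String) (ys : List (Int × String))
    (h : ∀ y ∈ ys, y.1 < x.1) :
    (PySem.List.insertBy pvB2 x ys).map (fun p => p.2)
      = PySem.List.insertBy pvB1 x.2 (ys.map (fun p => p.2)) := by
  induction ys with
  | nil => simp [PySem.List.insertBy]
  | cons y ys ih =>
    have hy : y.1 < x.1 := h y (by simp)
    have hb : pvB2 x y = pvB1 x.2 y.2 := by simp [pvB2, pvB1]; omega
    simp only [PySem.List.insertBy, List.map_cons, hb]
    cases hxy : pvB1 x.2 y.2 with
    | true => simp
    | false => simp [ih (fun a ha => h a (by simp [ha]))]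

lemma insertBy_mem' {α : Type} (before : α → α → Bool) (x : α) (ys : List α) :
    ∀ z ∈ PySem.List.insertBy before x ys, z = x ∨ z ∈ ys := by
  intro z hz
  have := (PySem.List.mem_insertBy (before := before) (x := x) (ys := ys) (y := z)).mp hz
  tauto

lemma map_snd_foldl_insert (L : List (Int × String)) : ∀ (acc : List (Int × String)),
    L.Pairwise (fun a b => a.1 < b.1) →
    (∀ a ∈ acc, ∀ b ∈ L, a.1 < b.1) →
    (L.foldl (fun acc x => PySem.List.insertBy pvB2 x acc) acc).map (fun p => p.2)
      = (L.map (fun p => p.2)).foldl (fun acc x => PySem.List.insertBy pvB1 x acc)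
          (acc.map (fun p => p.2)) := by
  induction L with
  | nil => intro acc _ _; simp
  | cons x L ih =>
    intro acc hL hacc
    simp only [List.foldl_cons, List.map_cons]
    rw [← map_snd_insertBy x acc (fun y hy => hacc y hy x (by simp))]
    apply ih
    · exact hL.sublist (List.sublist_cons_self x L)
    · intro a ha b hb
      rcases insertBy_mem' pvB2 x acc a ha with rfl | ha'
      · exact List.rel_of_pairwise_cons hL hb
      · exact hacc a ha' b (by simp [hb])

-- stability bridge: A's stable length sort is the decorated (length, index) sort, undecorated
lemma sorted_bridge (J : List String) :
    PySem.List.sorted J (fun t => PySem.Str.len t) false = (pvD J).map (fun p => p.2) := by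
  have hD : pvD J = (pvE J).foldl (fun acc x => PySem.List.insertBy pvB2 x acc) [] := rfl
  have hS : PySem.List.sorted J (fun t => PySem.Str.len t) false
      = J.foldl (fun acc x => PySem.List.insertBy pvB1 x acc) [] := by
    rw [PySem.List.sorted_eq_foldl_insertBy]; rfl
  rw [hD, hS, map_snd_foldl_insert (pvE J) [] (PySem.List.pairwise_lt_enumerate J 0) (by simp)]
  simp [pvE, PySem.List.map_snd_enumerate]

lemma insertBy_pairwise {α : Type} (before : α → α → Bool)
    (hasym : ∀ a b, before a b = true → before b a = false)
    (htrans : ∀ a b c, before a b = true → before b c = true → before a c = true)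
    (x : α) (ys : List α) (hys : ys.Pairwise (fun a b => before b a = false)) :
    (PySem.List.insertBy before x ys).Pairwise (fun a b => before b a = false) := by
  induction ys with
  | nil => simp [PySem.List.insertBy]
  | cons y ys ih =>
    rw [List.pairwise_cons] at hys
    simp only [PySem.List.insertBy]
    cases hxy : before x y with
    | true =>
      refine List.pairwise_cons.mpr ⟨?_, List.pairwise_cons.mpr hys⟩
      intro z hz
      rcases List.mem_cons.mp hz with rfl | hz'
      · exact hasym _ _ hxy
      · by_contra hzx
        have hzx' : before z x = true := by simpa using hzx
        have := htrans z x y hzx' hxy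
        rw [hys.1 z hz'] at this; exact Bool.noConfusion this
    | false =>
      refine List.pairwise_cons.mpr ⟨?_, ih hys.2⟩
      intro z hz
      rcases insertBy_mem' before x ys z hz with rfl | hz'
      · exact hxy
      · exact hys.1 z hz'

lemma foldl_insertBy_pairwise {α : Type} (before : α → α → Bool)
    (hasym : ∀ a b, before a b = true → before b a = false)
    (htrans : ∀ a b c, before a b = true → before b c = true → before a c = true)
    (L : List α) : ∀ (acc : List α), acc.Pairwise (fun a b => before b a = false) →
    (L.foldl (fun acc x => PySem.List.insertBy before x acc) acc).Pairwise
      (fun a b => before b a = false) := by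
  induction L with
  | nil => intro acc h; simpa using h
  | cons x L ih =>
    intro acc h
    exact ih _ (insertBy_pairwise before hasym htrans x acc h)

lemma pvD_perm (J : List String) : (pvD J).Perm (pvE J) :=
  PySem.List.sorted2_perm _ _ _ _

lemma pvE_fst_nodup (J : List String) : ((pvE J).map (fun p => p.1)).Nodup :=
  List.Pairwise.nodup (by
    rw [List.pairwise_map]
    exact (PySem.List.pairwise_lt_enumerate J 0).imp (fun h => by omega))

lemma pvD_pairwise (J : List String) : (pvD J).Pairwise pvKlt := by
  have h1 : (pvD J).Pairwise (fun a b => pvB2 b a = false) := by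
    have hd : pvD J = (pvE J).foldl (fun acc x => PySem.List.insertBy pvB2 x acc) [] := rfl
    rw [hd]
    apply foldl_insertBy_pairwise
    · intro a b h; simp [pvB2] at *; omega
    · intro a b c h1 h2; simp [pvB2] at *; omega
    · simp
  have h2 : (pvD J).Pairwise (fun a b => a.1 ≠ b.1) := by
    have : ((pvD J).map (fun p => p.1)).Nodup := ((pvD_perm J).map _).nodup_iff.mpr (pvE_fst_nodup J)
    rw [List.nodup_iff_pairwise_ne, List.pairwise_map] at this
    exact this
  exact (h1.and h2).imp (fun {a b} h => by
    obtain ⟨hb, hne⟩ := h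
    simp [pvB2, PySem.Str.len_eq] at hb
    unfold pvKlt
    simp [PySem.Str.len_eq]
    omega)

-- the inner keep test of A's loop, read off position-freely
lemma keep_iff (J : List String) (p : Int × String) (R : List (Int × String))
    (hp : (p :: R).Pairwise pvKlt) (hsub : ∀ e ∈ p :: R, e ∈ pvE J)
    (huc : ∀ e ∈ pvE J, ∀ x ∈ p :: R, pvKlt x e → e ∈ p :: R) :
    (R.any (fun q => PySem.Str.startswith q.2 p.2)) = (!pvQb J p) := by
  rw [← Bool.not_not (R.any _)]
  congr 1
  rw [Bool.eq_iff_iff, Bool.not_eq_true', List.any_eq_false, pvQb_iff]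
  simp only [PySem.Str.startswith_eq, PySem.Chars.startswith_iff]
  constructor
  · intro h
    constructor
    · rintro ⟨t, htJ, hpre, hlt⟩
      rcases List.mem_iff_getElem.mp htJ with ⟨k, hk, rfl⟩
      have he : ((0 + (k:Int)), J[k]) ∈ pvE J := by
        rw [pvE, PySem.List.mem_enumerate_iff]; exact ⟨k, hk, rfl⟩
      have hklt : pvKlt p ((0 + (k:Int)), J[k]) := by
        left; simp only [PySem.Str.len_eq]; exact_mod_cast hlt
      have := huc _ he p (by simp) hklt
      rcases List.mem_cons.mp this with heq | hmem
      · exact absurd (heq ▸ hklt) (pvKlt_irrefl p)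
      · exact absurd hpre (by simpa using h _ hmem)
    · intro q hq hq2
      by_contra hgt
      have hklt : pvKlt p q := by right; rw [hq2]; omega
      have := huc q hq p (by simp) hklt
      rcases List.mem_cons.mp this with heq | hmem
      · exact absurd (heq ▸ hklt) (pvKlt_irrefl p)
      · exact absurd (hq2 ▸ List.prefix_refl p.2.toList) (by simpa [hq2] using h _ hmem)
  · rintro ⟨h1, h2⟩ q hq
    intro hpre
    have hqE : q ∈ pvE J := hsub q (by simp [hq])
    have hlen : p.2.toList.length ≤ q.2.toList.length := hpre.length_le
    rcases lt_or_eq_of_le hlen with hlt | heq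
    · exact h1 ⟨q.2, snd_mem_of_mem_pvE J q hqE, hpre, hlt⟩
    · have hstr : p.2 = q.2 := String.toList_inj.mp (hpre.eq_of_length heq)
      have hklt : pvKlt p q := List.rel_of_pairwise_cons hp hq
      have := h2 q hqE hstr.symm
      rcases hklt with hl | ⟨_, hi⟩
      · rw [hstr] at hl; exact absurd hl (lt_irrefl _)
      · omega

lemma pvALoop_eq (J : List String) (l : List (Int × String))
    (hp : l.Pairwise pvKlt) (hsub : ∀ e ∈ l, e ∈ pvE J)
    (huc : ∀ e ∈ pvE J, ∀ x ∈ l, pvKlt x e → e ∈ l) :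
    pvALoop (l.map (fun p => p.2))
      = (l.filter (fun p => pvQb J p)).map (fun p => pvSplitDot p.2) := by
  induction l with
  | nil => simp [pvALoop]
  | cons p R ih =>
    have hpR : R.Pairwise pvKlt := (List.pairwise_cons.mp hp).2
    have hsubR : ∀ e ∈ R, e ∈ pvE J := fun e he => hsub e (by simp [he])
    have hucR : ∀ e ∈ pvE J, ∀ x ∈ R, pvKlt x e → e ∈ R := by
      intro e he x hx hklt
      rcases List.mem_cons.mp (huc e he x (by simp [hx]) hklt) with rfl | hm
      · exact absurd hklt (by
          intro h
          exact absurd (pvKlt_trans ((List.pairwise_cons.mp hp).1 x hx) h) (pvKlt_irrefl e))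
      · exact hm
    have hany : (R.any (fun q => PySem.Str.startswith q.2 p.2)) = (!pvQb J p) :=
      keep_iff J p R hp hsub huc
    simp only [List.map_cons, pvALoop, List.any_map]
    have hcomp : (fun u => PySem.Str.startswith u p.2) ∘ (fun p => p.2)
         = (fun q : Int × String => PySem.Str.startswith q.2 p.2) := rfl
    rw [hcomp, hany]
    cases hq : pvQb J p with
    | true => simp [hq, ih hpR hsubR hucR]
    | false => simp [hq, ih hpR hsubR hucR]

lemma mem_foldl_add {α β : Type} [BEq α] [LawfulBEq α] (f : β → α) (l : List β)
    (st : PySem.Set α) (x : α) :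
    x ∈ l.foldl (fun st k => PySem.Set.add st (f k)) st ↔ x ∈ st ∨ ∃ k ∈ l, x = f k := by
  induction l generalizing st with
  | nil => simp
  | cons a l ih =>
    simp only [List.foldl_cons, ih, PySem.Set.mem_add, List.mem_cons]
    constructor
    · rintro (⟨h|h⟩|⟨k,hk,rfl⟩)
      · exact Or.inl h
      · exact Or.inr ⟨a, Or.inl rfl, h⟩
      · exact Or.inr ⟨k, Or.inr hk, rfl⟩
    · rintro (h|⟨k,(rfl|hk),rfl⟩)
      · exact Or.inl (Or.inl h)
      · exact Or.inl (Or.inr rfl)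
      · exact Or.inr ⟨k, hk, rfl⟩

lemma chars_prefix_iff (s p : String) :
    PySem.Str.startswith s p = true ↔ p.toList <+: s.toList := by
  rw [PySem.Str.startswith_eq]; exact PySem.Chars.startswith_iff _ _

lemma lex_of_append (s r : List Char) (hr : r ≠ []) : List.Lex (· < ·) s (s ++ r) := by
  induction s with
  | nil => cases r with | nil => exact absurd rfl hr | cons b r' => exact List.Lex.nil
  | cons a s ih => exact List.Lex.cons ih

lemma lex_of_strict_prefix (s t : List Char) (h : s <+: t) (hne : s ≠ t) :
    List.Lex (· < ·) s t := by
  obtain ⟨r, rfl⟩ := h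
  apply lex_of_append
  intro hr
  exact hne (by simp [hr])

lemma str_lt_iff (s t : String) : s < t ↔ List.Lex (· < ·) s.toList t.toList := by
  rw [String.lt_iff_toList_lt]
  exact List.lt_iff_lex_lt _ _

lemma between_prefix : ∀ (s u t : List Char), s <+: t → List.Lex (· < ·) s u →
    (List.Lex (· < ·) u t ∨ u = t) → s <+: u := by
  intro s
  induction s with
  | nil => intro u t _ _ _; exact List.nil_prefix
  | cons c s ih =>
    intro u t hpre hsu hut
    obtain ⟨t', rfl, hpre'⟩ : ∃ t', t = c :: t' ∧ s <+: t' := by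
      rcases hpre with ⟨r, hr⟩
      cases t with
      | nil => simp at hr
      | cons d t' =>
        rw [List.cons_append] at hr
        injection hr with h1 h2
        exact ⟨t', by rw [h1], ⟨r, h2⟩⟩
    cases hsu with
    | rel hcb =>
      exfalso
      rcases hut with hlex | heq
      · cases hlex with
        | rel h => exact lt_asymm hcb h
        | cons h => exact lt_irrefl _ hcb
      · injection heq with h1 _
        rw [h1] at hcb
        exact lt_irrefl _ hcb
    | cons hlex' =>
      rename_i u'
      have hu' : s <+: u' := by
        rcases hut with hlex | heq
        · cases hlex with
          | rel h => exact absurd h (lt_irrefl _)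
          | cons h => exact ih u' t' hpre' hlex' (Or.inl h)
        · injection heq with _ h2
          exact ih u' t' hpre' hlex' (Or.inr h2)
      exact List.cons_prefix_cons.mpr ⟨rfl, hu'⟩

lemma pairwise_lt_index_lt (d : List String) (hpw : d.Pairwise (· < ·))
    (k m : Nat) (hk : k < d.length) (hm : m < d.length) (h : d[k] < d[m]) : k < m := by
  by_contra hc
  have hc' : m ≤ k := Nat.le_of_not_lt hc
  rcases Nat.lt_or_ge m k with h' | h'
  · exact lt_asymm h (List.pairwise_iff_getElem.mp hpw m k hm hk h')
  · have : m = k := by omega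
    subst this
    exact lt_irrefl _ h

lemma mem_dead_iff (J : List String) (x : String) (hx : x ∈ J) :
    PySem.Set.contains (pvDead J) x = true ↔
      ∃ t ∈ J, x.toList <+: t.toList ∧ x.toList.length < t.toList.length := by
  have hmemd : ∀ y, y ∈ pvDistinct J ↔ y ∈ J := by
    intro y
    rw [pvDistinct, PySem.List.mem_sorted, PySem.Set.mem_ofList]
  have hpw : (pvDistinct J).Pairwise (· < ·) := PySem.List.sorted_ofList_pairwise_lt J
  rw [show PySem.Set.contains (pvDead J) x = List.contains (pvDead J) x from rfl,
    List.contains_iff_mem]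
  have hfold : x ∈ pvDead J ↔
      ∃ p ∈ ((pvDistinct J).zip (pvDistinct J).tail).filter
          (fun ab => PySem.Str.startswith ab.2 ab.1), x = p.1 := by
    rw [pvDead, PySem.List.slice_from_one, PySem.List.foldl_if_eq_foldl_filter
      (fun ab => PySem.Str.startswith ab.2 ab.1) (fun st (ab : String × String) => PySem.Set.add st ab.1)]
    rw [mem_foldl_add (fun ab : String × String => ab.1)]
    simp
  rw [hfold]
  have hlen : ∀ {k : Nat}, k < ((pvDistinct J).zip (pvDistinct J).tail).length ↔
      k + 1 < (pvDistinct J).length := by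
    intro k
    rw [List.length_zip, List.length_tail]
    omega
  constructor
  · rintro ⟨p, hp, rfl⟩
    rw [List.mem_filter] at hp
    obtain ⟨hpz, hsw⟩ := hp
    rcases List.mem_iff_getElem.mp hpz with ⟨k, hk, hpk⟩
    have hk1 : k + 1 < (pvDistinct J).length := hlen.mp hk
    have hpk' : p = ((pvDistinct J)[k], (pvDistinct J)[k+1]) := by
      rw [← hpk, List.getElem_zip]
      congr 1
      rw [List.getElem_tail]
    subst hpk'
    simp only at hsw ⊢
    have hpre : (pvDistinct J)[k].toList <+: (pvDistinct J)[k+1].toList :=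
      (chars_prefix_iff _ _).mp hsw
    refine ⟨(pvDistinct J)[k+1], (hmemd _).mp (by exact List.getElem_mem hk1), hpre, ?_⟩
    rcases Nat.lt_or_ge (pvDistinct J)[k].toList.length (pvDistinct J)[k+1].toList.length with h | h
    · exact h
    · exfalso
      have heqlen : (pvDistinct J)[k].toList.length = (pvDistinct J)[k+1].toList.length :=
        le_antisymm hpre.length_le h
      have : (pvDistinct J)[k] = (pvDistinct J)[k+1] :=
        String.toList_inj.mp (hpre.eq_of_length heqlen)
      have hlt : (pvDistinct J)[k] < (pvDistinct J)[k+1] :=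
        List.pairwise_iff_getElem.mp hpw k (k+1) (by omega) hk1 (by omega)
      rw [this] at hlt
      exact lt_irrefl _ hlt
  · rintro ⟨t, ht, hpre, hltlen⟩
    have hxd : x ∈ pvDistinct J := (hmemd x).mpr hx
    have htd : t ∈ pvDistinct J := (hmemd t).mpr ht
    rcases List.mem_iff_getElem.mp hxd with ⟨k, hk, rfl⟩
    rcases List.mem_iff_getElem.mp htd with ⟨m, hm, rfl⟩
    have hne : (pvDistinct J)[k] ≠ (pvDistinct J)[m] := by
      intro h
      rw [h] at hltlen
      exact lt_irrefl _ hltlen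
    have hlex : List.Lex (· < ·) (pvDistinct J)[k].toList (pvDistinct J)[m].toList :=
      lex_of_strict_prefix _ _ hpre (fun h => hne (String.toList_inj.mp h))
    have hklt : (pvDistinct J)[k] < (pvDistinct J)[m] := (str_lt_iff _ _).mpr hlex
    have hkm : k < m := pairwise_lt_index_lt _ hpw k m hk hm hklt
    have hk1 : k + 1 < (pvDistinct J).length := by omega
    have hule : List.Lex (· < ·) (pvDistinct J)[k+1].toList (pvDistinct J)[m].toList ∨
        (pvDistinct J)[k+1].toList = (pvDistinct J)[m].toList := by
      rcases Nat.lt_or_ge (k+1) m with h | h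
      · exact Or.inl ((str_lt_iff _ _).mp (List.pairwise_iff_getElem.mp hpw (k+1) m hk1 hm h))
      · have : k + 1 = m := by omega
        subst this
        exact Or.inr rfl
    have hxlu : List.Lex (· < ·) (pvDistinct J)[k].toList (pvDistinct J)[k+1].toList :=
      (str_lt_iff _ _).mp (List.pairwise_iff_getElem.mp hpw k (k+1) hk hk1 (by omega))
    have hpru : (pvDistinct J)[k].toList <+: (pvDistinct J)[k+1].toList :=
      between_prefix _ _ _ hpre hxlu hule
    refine ⟨((pvDistinct J)[k], (pvDistinct J)[k+1]), ?_, rfl⟩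
    rw [List.mem_filter]
    constructor
    · apply List.mem_iff_getElem.mpr
      refine ⟨k, hlen.mpr hk1, ?_⟩
      rw [List.getElem_zip]
      congr 1
      rw [List.getElem_tail]
    · exact (chars_prefix_iff _ _).mpr hpru

lemma pvLast_get? (J : List String) (s : String) (v : Int) :
    (pvLast J).get? s = some v ↔
      (∃ q ∈ pvE J, q.2 = s ∧ q.1 = v) ∧ (∀ r ∈ pvE J, r.2 = s → r.1 ≤ v) := by
  induction J using List.reverseRecOn with
  | nil => simp [pvLast, pvE, PySem.List.enumerate]
  | append_singleton J' t ih =>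
    have hE : pvE (J' ++ [t]) = pvE J' ++ [((J'.length : Int), t)] := by
      unfold pvE
      rw [PySem.List.enumerate_append]
      simp [PySem.List.enumerate]
    have hlast : pvLast (J' ++ [t]) = (pvLast J').insert t (J'.length : Int) := by
      unfold pvLast
      rw [show PySem.List.enumerate (J' ++ [t]) 0 = pvE (J' ++ [t]) from rfl, hE]
      rw [List.foldl_append]
      rfl
    have hbound : ∀ r ∈ pvE (J' ++ [t]), r.1 ≤ (J'.length : Int) := by
      intro r hr
      rcases (PySem.List.mem_enumerate_iff _ _ _).mp hr with ⟨k, hk, rfl⟩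
      simp at hk ⊢
      omega
    rw [hlast]
    by_cases hts : t = s
    · subst hts
      rw [PySem.Dict.get?_insert_self]
      constructor
      · rintro h
        have hv : v = (J'.length : Int) := by simpa using h.symm
        subst hv
        exact ⟨⟨((J'.length : Int), t), by rw [hE]; simp, rfl, rfl⟩, fun r hr _ => hbound r hr⟩
      · rintro ⟨⟨q, hq, hq2, hq1⟩, hall⟩
        have h1 : v ≤ (J'.length : Int) := hq1 ▸ hbound q hq
        have h2 : (J'.length : Int) ≤ v := hall ((J'.length : Int), t) (by rw [hE]; simp) rfl
        rw [show v = (J'.length : Int) by omega]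
    · rw [PySem.Dict.get?_insert_of_ne _ _ (fun h => hts h.symm)]
      rw [ih]
      constructor
      · rintro ⟨⟨q, hq, hq2, hq1⟩, hall⟩
        refine ⟨⟨q, by rw [hE]; simp [hq], hq2, hq1⟩, ?_⟩
        intro r hr hr2
        rw [hE] at hr
        rcases List.mem_append.mp hr with h | h
        · exact hall r h hr2
        · simp at h
          rw [h] at hr2
          exact absurd hr2 hts
      · rintro ⟨⟨q, hq, hq2, hq1⟩, hall⟩
        rw [hE] at hq
        rcases List.mem_append.mp hq with h | h
        · refine ⟨⟨q, h, hq2, hq1⟩, ?_⟩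
          intro r hr hr2
          exact hall r (by rw [hE]; simp [hr]) hr2
        · simp at h
          rw [h] at hq2
          exact absurd hq2 hts

lemma fB_eq_Qb (J : List String) (p : Int × String) (hp : p ∈ pvE J) :
    (!(PySem.Set.contains (pvDead J) p.2) &&
      (PySem.Dict.get? (pvLast J) p.2 == some p.1)) = pvQb J p := by
  have hpJ : p.2 ∈ J := snd_mem_of_mem_pvE J p hp
  rw [Bool.eq_iff_iff, Bool.and_eq_true, Bool.not_eq_true', pvQb_iff]
  rw [show ((PySem.Dict.get? (pvLast J) p.2 == some p.1) = true) ↔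
        (PySem.Dict.get? (pvLast J) p.2 = some p.1) from beq_iff_eq]
  rw [pvLast_get?]
  constructor
  · rintro ⟨hset, ⟨_, hall⟩⟩
    refine ⟨?_, hall⟩
    intro hex
    rw [← Bool.not_eq_true (PySem.Set.contains (pvDead J) p.2)] at hset
    exact absurd ((mem_dead_iff J p.2 hpJ).mpr hex) (by simpa using hset)
  · rintro ⟨hnex, hall⟩
    refine ⟨?_, ⟨p, hp, rfl, rfl⟩, hall⟩
    rw [Bool.eq_false_iff]
    intro hc
    exact hnex ((mem_dead_iff J p.2 hpJ).mp hc)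

-- two permutations that are both strictly sorted by an asymmetric relation coincide
lemma eq_of_perm_of_pairwise {α : Type} (T : α → α → Prop)
    (hasym : ∀ a b, T a b → T b a → False) :
    ∀ (l₁ l₂ : List α), l₁.Perm l₂ → l₁.Pairwise T → l₂.Pairwise T → l₁ = l₂ := by
  intro l₁
  induction l₁ with
  | nil => intro l₂ hp _ _; simpa using hp.symm.eq_nil ▸ rfl
  | cons a t ih =>
    intro l₂ hp h1 h2
    cases l₂ with
    | nil => exact absurd hp.symm (by simp)
    | cons b t₂ =>
      have hab : a = b := by
        have ha : a ∈ b :: t₂ := hp.mem_iff.mp (by simp)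
        have hb : b ∈ a :: t := hp.mem_iff.mpr (by simp)
        rcases List.mem_cons.mp ha with h|h
        · exact h
        · rcases List.mem_cons.mp hb with h'|h'
          · exact h'.symm
          · exact absurd (List.rel_of_pairwise_cons h1 h') (fun hT => hasym _ _ hT (List.rel_of_pairwise_cons h2 h))
      subst hab
      have := ih t₂ (hp.cons_inv) (h1.sublist (List.sublist_cons_self a t)) (h2.sublist (List.sublist_cons_self a t₂))
      rw [this]

lemma sorted2_eq (xs ys : List (Int × Int × String))
    (hperm : ys.Perm xs) (hnd : (xs.map (fun q => q.2.1)).Nodup)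
    (hpw : ys.Pairwise pvLex2) :
    PySem.List.sorted2 xs (fun q => q.1) (fun q => q.2.1) false = ys := by
  have hdef : PySem.List.sorted2 xs (fun q => q.1) (fun q => q.2.1) false
      = xs.foldl (fun acc x => PySem.List.insertBy pvB3 x acc) [] := rfl
  have hzperm : (PySem.List.sorted2 xs (fun q => q.1) (fun q => q.2.1) false).Perm xs :=
    PySem.List.sorted2_perm _ _ _ _
  have hzw : (PySem.List.sorted2 xs (fun q => q.1) (fun q => q.2.1) false).Pairwise
      (fun a b => pvB3 b a = false) := by
    rw [hdef]
    apply foldl_insertBy_pairwise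
    · intro a b h; simp [pvB3] at *; omega
    · intro a b c h1 h2; simp [pvB3] at *; omega
    · simp
  have hznd : ((PySem.List.sorted2 xs (fun q => q.1) (fun q => q.2.1) false).map (fun q => q.2.1)).Nodup :=
    (hzperm.map _).nodup_iff.mpr hnd
  have hzne : (PySem.List.sorted2 xs (fun q => q.1) (fun q => q.2.1) false).Pairwise
      (fun a b => a.2.1 ≠ b.2.1) := by
    rw [List.nodup_iff_pairwise_ne, List.pairwise_map] at hznd
    exact hznd
  have hzs : (PySem.List.sorted2 xs (fun q => q.1) (fun q => q.2.1) false).Pairwise pvLex2 :=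
    (hzw.and hzne).imp (fun {a b} h => by
      obtain ⟨hb, hne⟩ := h
      simp [pvB3] at hb
      unfold pvLex2
      omega)
  exact eq_of_perm_of_pairwise pvLex2 (fun a b h1 h2 => by unfold pvLex2 at *; omega)
    _ ys (hzperm.trans hperm.symm) hzs hpw

-- ===== VERDICT (by name: the statement is the Claim_ definition above) =====
theorem shorten_traces_spec : Claim_equal_shorten_traces := by
  intro traces _
  unfold Spec_shorten_traces
  have hA : shorten_traces traces
      = pvALoop (PySem.List.sorted (traces.map (fun tr => PySem.Str.join "." tr))
          (fun t => PySem.Str.len t) false) := rfl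
  set J := traces.map (fun tr => PySem.Str.join "." tr) with hJdef
  have hB : shorten_traces_alt traces =
      (PySem.List.sorted2
        (((pvE J).filter
            (fun p => !(PySem.Set.contains (pvDead J) p.2) &&
              (PySem.Dict.get? (pvLast J) p.2 == some p.1))).map pvDec)
        (fun q => q.1) (fun q => q.2.1) false).map (fun q => pvSplitDot q.2.2) := rfl
  have hsub : ∀ e ∈ pvD J, e ∈ pvE J := fun e he => (pvD_perm J).mem_iff.mp he
  have huc : ∀ e ∈ pvE J, ∀ x ∈ pvD J, pvKlt x e → e ∈ pvD J :=
    fun e he _ _ _ => (pvD_perm J).mem_iff.mpr he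
  rw [hA, sorted_bridge, pvALoop_eq J (pvD J) (pvD_pairwise J) hsub huc, hB]
  rw [List.filter_congr (fun p hp => fB_eq_Qb J p hp)]
  have hperm : (((pvD J).filter (fun p => pvQb J p)).map pvDec).Perm
      (((pvE J).filter (fun p => pvQb J p)).map pvDec) :=
    ((pvD_perm J).filter _).map _
  have hnd : ((((pvE J).filter (fun p => pvQb J p)).map pvDec).map (fun q => q.2.1)).Nodup := by
    rw [List.map_map]
    exact (List.filter_sublist.map _).nodup (pvE_fst_nodup J)
  have hpw : (((pvD J).filter (fun p => pvQb J p)).map pvDec).Pairwise pvLex2 := by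
    rw [List.pairwise_map]
    exact ((pvD_pairwise J).sublist List.filter_sublist).imp (fun {a b} h => h)
  rw [sorted2_eq _ _ hperm hnd hpw]
  rw [List.map_map]
  rfl
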